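-- pv_equiv track=rewrite | github.com/Leyukezer-Sys/CyberSecurit_Developement | atividade_5/simple/analise_trafego.py | analyze_traffic
-- ===== SOURCE A (Python) =====
-- from collections import defaultdict, deque
--
-- def analyze_traffic(traffic_data):
--     """
--     Analisa os dados de tráfego e detecta port scans
--     """
--     # Contagem total de eventos por IP
--     eventos_por_ip = defaultdict(int)
--
--     # Para detecção de port scan: armazena eventos por IP com timestamps
--     eventos_detalhados = defaultdict(list)
--
--     # Processa cada evento
--     for timestamp, ip_origem, porta_destino in traffic_data:
--         eventos_por_ip[ip_origem] += 1
--         eventos_detalhados[ip_origem].append((timestamp, porta_destino))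
--
--     # Detecta port scans
--     portscan_detectado = {}
--
--     for ip, eventos in eventos_detalhados.items():
--         # Ordena eventos por timestamp
--         eventos.sort(key=lambda x: x[0])
--
--         # Usa uma janela deslizante de 60 segundos
--         portas_unicas_janela = set()
--         janela = deque()
--         detectado = False
--
--         for evento in eventos:
--             timestamp, porta = evento
--             janela.append(evento)
--             portas_unicas_janela.add(porta)
--
--             # Remove eventos fora da janela de 60 segundos
--             while janela and timestamp - janela[0][0] > 60:
--                 evento_antigo = janela.popleft()
--                 # Se a porta do evento removido não aparece mais na janela, remove da contagem
--                 porta_antiga = evento_antigo[1]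
--                 if all(evt[1] != porta_antiga for evt in janela):
--                     portas_unicas_janela.discard(porta_antiga)
--
--             # Verifica se há port scan (mais de 10 portas distintas em 60 segundos)
--             if len(portas_unicas_janela) > 10:
--                 detectado = True
--                 break
--
--         portscan_detectado[ip] = detectado
--
--     return eventos_por_ip, portscan_detectado
-- ===== SOURCE B (Python) =====
-- def _portscan(events):
--     # events sorted by timestamp ascending.
--     # A port lies in the 60s window ending at the current event iff its most
--     # recent occurrence is at most 60s old, so it suffices to track the last
--     # time each port was seen, dropping entries once they go stale.
--     last = {}
--     for t, p in events:
--         last[p] = t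
--         last = {q: v for q, v in last.items() if t - v <= 60}
--         if len(last) > 10:
--             return True
--     return False
--
-- def analyze_traffic(traffic_data):
--     groups = {}
--     for t, ip, port in traffic_data:
--         groups.setdefault(ip, []).append((t, port))
--     counts = {ip: len(evs) for ip, evs in groups.items()}
--     flags = {ip: _portscan(sorted(evs, key=lambda e: e[0])) for ip, evs in groups.items()}
--     return counts, flags
-- ===== Notes on version B (the rewrite author's own statement) =====
-- stated objective: faster
-- what changed: B drops A's deque+set sliding window entirely: it keeps only a last-seen-timestamp dict per port (a port is in the 60s window iff its most recent occurrence is at most 60s old), pruning stale entries, so A's per-eviction rescan of the whole window disappears; per-IP totals come from the grouped lists.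
import Mathlib
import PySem

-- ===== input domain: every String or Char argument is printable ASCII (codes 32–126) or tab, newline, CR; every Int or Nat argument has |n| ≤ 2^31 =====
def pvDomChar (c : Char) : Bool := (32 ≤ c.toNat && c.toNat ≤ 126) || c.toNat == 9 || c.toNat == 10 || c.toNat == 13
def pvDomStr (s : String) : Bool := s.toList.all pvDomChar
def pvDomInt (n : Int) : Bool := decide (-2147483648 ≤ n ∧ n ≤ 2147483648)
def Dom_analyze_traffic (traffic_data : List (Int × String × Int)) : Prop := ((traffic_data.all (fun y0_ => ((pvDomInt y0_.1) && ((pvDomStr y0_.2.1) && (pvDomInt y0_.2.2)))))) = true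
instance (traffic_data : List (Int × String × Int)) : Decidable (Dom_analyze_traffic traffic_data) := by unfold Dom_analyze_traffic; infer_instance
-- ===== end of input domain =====

-- B drops A's deque+set sliding window: a port is in the 60s window iff its most recent
-- occurrence is at most 60s old, so B keeps only a last-seen-timestamp dict per port,
-- pruned of stale entries each step (objective: faster — no per-eviction window rescan).

-- ===== PORT A =====
-- A's inner `while` loop: pops events older than 60s; a popped port leaves the set only
-- when a rescan of the remaining window (`all(evt[1] != porta_antiga ...)`) finds it gone.
def pyAScanPop (timestamp : Int) : List (Int × Int) → PySem.Set Int → (List (Int × Int)) × PySem.Set Int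
  | [], portas => ([], portas)
  | evento_antigo :: janela, portas =>
      if timestamp - evento_antigo.1 > 60 then
        pyAScanPop timestamp janela
          (if janela.all (fun evt => evt.2 != evento_antigo.2) then
             PySem.Set.discard portas evento_antigo.2
           else portas)
      else (evento_antigo :: janela, portas)

-- A's `for evento in eventos` loop with its `break` (returns `detectado`).
def pyAScan : List (Int × Int) → List (Int × Int) → PySem.Set Int → Bool
  | [], _, _ => false
  | evento :: eventos, janela, portas =>
      let st := pyAScanPop evento.1 (janela ++ [evento]) (PySem.Set.add portas evento.2)
      if st.2.length > 10 then true
      else pyAScan eventos st.1 st.2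

def analyze_traffic (traffic_data : List (Int × String × Int)) : (List (String × Int)) × (List (String × Bool)) :=
  let acc := traffic_data.foldl
    (fun (acc : PySem.Dict String Int × PySem.Dict String (List (Int × Int))) e =>
      (acc.1.modify e.2.1 0 (· + 1), acc.2.modify e.2.1 [] (· ++ [(e.1, e.2.2)])))
    (PySem.Dict.empty, PySem.Dict.empty)
  let portscan_detectado := acc.2.items.foldl
    (fun (d : PySem.Dict String Bool) kv =>
      d.insert kv.1 (pyAScan (PySem.List.sorted kv.2 (fun x => x.1) false) [] PySem.Set.empty))
    PySem.Dict.empty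
  (acc.1.items, portscan_detectado.items)

-- ===== PORT B =====
-- B's `_portscan`: last-seen dict, pruned to entries at most 60s old (the dict
-- comprehension `{q: v for q, v in last.items() if t - v <= 60}`), early return True.
def pyBDetect : List (Int × Int) → PySem.Dict Int Int → Bool
  | [], _ => false
  | e :: es, last =>
      let last' : PySem.Dict Int Int :=
        PySem.Dict.mk ((last.insert e.2 e.1).items.filter (fun q => decide (e.1 - q.2 ≤ 60)))
      if last'.size > 10 then true else pyBDetect es last'

def analyze_traffic_alt (traffic_data : List (Int × String × Int)) : (List (String × Int)) × (List (String × Bool)) :=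
  let groups := traffic_data.foldl
    (fun (d : PySem.Dict String (List (Int × Int))) e => d.modify e.2.1 [] (· ++ [(e.1, e.2.2)]))
    PySem.Dict.empty
  let counts := groups.items.foldl
    (fun (d : PySem.Dict String Int) kv => d.insert kv.1 (kv.2.length : Int)) PySem.Dict.empty
  let flags := groups.items.foldl
    (fun (d : PySem.Dict String Bool) kv =>
      d.insert kv.1 (pyBDetect (PySem.List.sorted kv.2 (fun x => x.1) false) PySem.Dict.empty))
    PySem.Dict.empty
  (counts.items, flags.items)

-- ===== PRECONDITION & SPEC =====
def Spec_analyze_traffic (traffic_data : List (Int × String × Int)) (out : (List (String × Int)) × (List (String × Bool))) : Prop := out = analyze_traffic_alt traffic_data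
instance (traffic_data : List (Int × String × Int)) (out : (List (String × Int)) × (List (String × Bool))) : Decidable (Spec_analyze_traffic traffic_data out) := by unfold Spec_analyze_traffic; infer_instance

-- ===== CLAIM (what is proved, stated in full; the proofs are below) =====
def Claim_equal_analyze_traffic : Prop := ∀ (traffic_data : List (Int × String × Int)), Dom_analyze_traffic traffic_data → Spec_analyze_traffic traffic_data (analyze_traffic traffic_data)

-- ===== LEMMAS AND PROOFS =====

-- get? of a dict whose items were filtered by a predicate on the VALUE only.
theorem get?_mk_filter (l : List (Int × Int)) (P : Int → Bool) (p : Int)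
    (hnd : (l.map (·.1)).Nodup) :
    (PySem.Dict.mk (l.filter (fun q => P q.2))).get? p =
      ((PySem.Dict.mk l).get? p).bind (fun v => if P v then some v else none) := by
  induction l with
  | nil => rfl
  | cons a l ih =>
      obtain ⟨k, v⟩ := a
      simp only [List.map_cons, List.nodup_cons] at hnd
      by_cases hk : k = p
      · subst hk
        by_cases hv : P v = true
        · rw [List.filter_cons, if_pos (by simpa using hv),
            PySem.Dict.get?_mk_cons, PySem.Dict.get?_mk_cons]
          simp [hv]
        · have h0 : (PySem.Dict.mk l).get? k = none := by
            rw [PySem.Dict.get?_eq_none_iff_not_mem_keys]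
            simpa [PySem.Dict.keys] using hnd.1
          have hnone : (PySem.Dict.mk (l.filter (fun q => P q.2))).get? k = none := by
            rw [ih hnd.2, h0]
            rfl
          rw [List.filter_cons, if_neg (by simpa using hv), hnone, PySem.Dict.get?_mk_cons]
          simp [hv]
      · by_cases hv : P v = true
        · rw [List.filter_cons, if_pos (by simpa using hv),
            PySem.Dict.get?_mk_cons, PySem.Dict.get?_mk_cons, ih hnd.2]
          simp [hk]
        · rw [List.filter_cons, if_neg (by simpa using hv), ih hnd.2, PySem.Dict.get?_mk_cons]
          simp [hk]

-- In a time-sorted window, "at most 60s old" fails at the last event iff it fails everywhere.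
theorem getLast?_filter_recent (l : List (Int × Int)) (t : Int)
    (hs : l.Pairwise (fun a b => a.1 ≤ b.1)) :
    (l.filter (fun x => decide (t - x.1 ≤ 60))).getLast? =
      l.getLast?.bind (fun x => if t - x.1 ≤ 60 then some x else none) := by
  rcases List.eq_nil_or_concat l with rfl | ⟨init, x, rfl⟩
  · rfl
  · rw [List.concat_eq_append] at hs ⊢
    by_cases hx : t - x.1 ≤ 60
    · have hfx : List.filter (fun y => decide (t - y.1 ≤ 60)) [x] = [x] := by
        simp only [List.filter_cons, List.filter_nil]
        rw [if_pos (by simpa using hx)]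
      rw [List.filter_append, hfx, List.getLast?_concat, List.getLast?_concat,
        Option.bind_some, if_pos hx]
    · have hinit : List.filter (fun y => decide (t - y.1 ≤ 60)) init = [] := by
        rw [List.filter_eq_nil_iff]
        intro y hy
        have hle : y.1 ≤ x.1 := (List.pairwise_append.mp hs).2.2 y hy x (by simp)
        simp only [decide_eq_true_eq]
        omega
      have hfx : List.filter (fun y => decide (t - y.1 ≤ 60)) [x] = [] := by
        simp only [List.filter_cons, List.filter_nil]
        rw [if_neg (by simpa using hx)]
      rw [List.filter_append, hinit, hfx, List.getLast?_concat, Option.bind_some, if_neg hx]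
      rfl

-- A's pop loop on a time-sorted window keeps exactly the events at most 60s old,
-- and preserves "portas = the distinct ports of the window".
theorem pop_spec (t : Int) : ∀ (janela : List (Int × Int)) (portas : PySem.Set Int),
    janela.Pairwise (fun a b => a.1 ≤ b.1) → portas.Nodup →
    (∀ p : Int, p ∈ portas ↔ p ∈ janela.map (·.2)) →
    (pyAScanPop t janela portas).1 = janela.filter (fun x => decide (t - x.1 ≤ 60)) ∧
    (pyAScanPop t janela portas).2.Nodup ∧
    (∀ p : Int, p ∈ (pyAScanPop t janela portas).2 ↔
      p ∈ (janela.filter (fun x => decide (t - x.1 ≤ 60))).map (·.2)) := by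
  intro janela
  induction janela with
  | nil =>
      intro portas _ hnd hmem
      exact ⟨rfl, hnd, by simpa [pyAScanPop] using hmem⟩
  | cons e rest ih =>
      intro portas hs hnd hmem
      rw [List.pairwise_cons] at hs
      by_cases hc : t - e.1 > 60
      · have hfe : (decide (t - e.1 ≤ 60)) = false := by simp; omega
        simp only [pyAScanPop, if_pos hc, List.filter_cons, hfe, Bool.false_eq_true, if_false]
        apply ih _ hs.2
        · split_ifs with h1
          · exact PySem.Set.nodup_discard portas e.2 hnd
          · exact hnd
        · have hall : (rest.all (fun evt => evt.2 != e.2) = true) ↔ e.2 ∉ rest.map (·.2) := by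
            simp [List.all_eq_true, bne_iff_ne, List.mem_map]
            aesop
          intro p
          by_cases hm : e.2 ∈ rest.map (·.2)
          · rw [if_neg (by simp [hall, hm])]
            rw [hmem p]
            simp only [List.map_cons, List.mem_cons]
            constructor
            · rintro (rfl | hx) <;> [exact hm; exact hx]
            · exact Or.inr
          · rw [if_pos (hall.mpr hm)]
            rw [PySem.Set.mem_discard, hmem p]
            simp only [List.map_cons, List.mem_cons]
            constructor
            · rintro ⟨(rfl | hx), hne⟩ <;> [exact absurd rfl hne; exact hx]
            · intro hx
              exact ⟨Or.inr hx, fun hxe => hm (hxe ▸ hx)⟩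
      · have hall2 : (e :: rest).filter (fun x => decide (t - x.1 ≤ 60)) = e :: rest := by
          rw [List.filter_eq_self]
          intro x hx
          rcases List.mem_cons.mp hx with rfl | hx'
          · simp only [decide_eq_true_eq]
            omega
          · have h1 := hs.1 x hx'
            simp only [decide_eq_true_eq]
            omega
        have hA : pyAScanPop t (e :: rest) portas = (e :: rest, portas) := by
          simp [pyAScanPop, hc]
        rw [hA, hall2]
        exact ⟨rfl, hnd, fun p => hmem p⟩

-- The invariant tying A's state (window, set of ports) to B's last-seen dict:
-- last maps p to the time of p's most recent occurrence in the window.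
def ScanInv (janela : List (Int × Int)) (portas : PySem.Set Int) (last : PySem.Dict Int Int) : Prop :=
  portas.Nodup ∧ (∀ p : Int, p ∈ portas ↔ p ∈ janela.map (·.2)) ∧
  last.keys.Nodup ∧
  (∀ p : Int, last.get? p = ((janela.filter (fun x => x.2 == p)).getLast?).map (·.1))

theorem ScanInv.size_eq {janela portas last} (h : ScanInv janela portas last) :
    portas.length = last.size := by
  obtain ⟨h1, h2, h3, h4⟩ := h
  have hperm : portas.Perm last.keys := by
    rw [List.perm_ext_iff_of_nodup h1 h3]
    intro p
    rw [h2, ← not_iff_not, ← PySem.Dict.get?_eq_none_iff_not_mem_keys, h4]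
    simp only [Option.map_eq_none_iff, List.getLast?_eq_none_iff, List.filter_eq_nil_iff]
    constructor
    · intro hnm x hx
      simp only [beq_iff_eq]
      intro hxe
      exact hnm (List.mem_map.mpr ⟨x, hx, hxe⟩)
    · intro hall hm
      obtain ⟨x, hx, hxe⟩ := List.mem_map.mp hm
      exact absurd hxe (by simpa using hall x hx)
  simpa [PySem.Dict.keys, PySem.Dict.size] using hperm.length_eq

theorem scan_equiv : ∀ (events janela : List (Int × Int)) (portas : PySem.Set Int)
    (last : PySem.Dict Int Int),
    janela.Pairwise (fun a b => a.1 ≤ b.1) →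
    events.Pairwise (fun a b => a.1 ≤ b.1) →
    (∀ x ∈ janela, ∀ e ∈ events, x.1 ≤ e.1) →
    ScanInv janela portas last →
    pyAScan events janela portas = pyBDetect events last := by
  intro events
  induction events with
  | nil => intro janela portas last _ _ _ _; rfl
  | cons e es ih =>
      intro janela portas last hjs hes hje hinv
      obtain ⟨hnd, hmem, hknd, hget⟩ := hinv
      rw [List.pairwise_cons] at hes
      have hje' : ∀ x ∈ janela, x.1 ≤ e.1 := fun x hx => hje x hx e (by simp)
      -- the appended window is still sorted, with the right port set
      have hs' : (janela ++ [e]).Pairwise (fun a b => a.1 ≤ b.1) := by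
        rw [List.pairwise_append]
        exact ⟨hjs, List.pairwise_singleton _ _, by simpa using hje'⟩
      have hmem' : ∀ p : Int, p ∈ PySem.Set.add portas e.2 ↔ p ∈ (janela ++ [e]).map (·.2) := by
        intro p
        rw [PySem.Set.mem_add, hmem p]
        simp only [List.map_append, List.map_cons, List.map_nil, List.mem_append,
          List.mem_singleton]
      obtain ⟨hw, hnd2, hmem2⟩ := pop_spec e.1 (janela ++ [e]) (PySem.Set.add portas e.2)
        hs' (PySem.Set.nodup_add portas e.2 hnd) hmem'
      -- B's pruned dict matches the popped window
      have hknd1 : ((last.insert e.2 e.1).items.map (·.1)).Nodup :=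
        PySem.Dict.nodup_keys_insert _ _ _ hknd
      have hget2 : ∀ p : Int,
          (PySem.Dict.mk ((last.insert e.2 e.1).items.filter (fun q => decide (e.1 - q.2 ≤ 60)))).get? p =
          ((((janela ++ [e]).filter (fun x => decide (e.1 - x.1 ≤ 60))).filter
              (fun x => x.2 == p)).getLast?).map (·.1) := by
        intro p
        rw [get?_mk_filter ((last.insert e.2 e.1).items) (fun v => decide (e.1 - v ≤ 60)) p hknd1]
        have hcomm : ((janela ++ [e]).filter (fun x => decide (e.1 - x.1 ≤ 60))).filter
            (fun x => x.2 == p) =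
            ((janela ++ [e]).filter (fun x => x.2 == p)).filter
              (fun x => decide (e.1 - x.1 ≤ 60)) := by
          rw [List.filter_filter, List.filter_filter]
          congr 1
          funext x
          exact Bool.and_comm _ _
        rw [hcomm]
        have hsp : ((janela ++ [e]).filter (fun x => x.2 == p)).Pairwise
            (fun a b => a.1 ≤ b.1) := hs'.sublist List.filter_sublist
        rw [getLast?_filter_recent _ _ hsp]
        by_cases hp : p = e.2
        · rw [hp, PySem.Dict.get?_insert_self]
          have hfe : (janela ++ [e]).filter (fun x => x.2 == e.2) =
              janela.filter (fun x => x.2 == e.2) ++ [e] := by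
            simp [List.filter_append]
          rw [hfe, List.getLast?_concat]
          simp
        · rw [PySem.Dict.get?_insert_of_ne _ _ hp, hget p]
          have : (janela ++ [e]).filter (fun x => x.2 == p) =
              janela.filter (fun x => x.2 == p) := by
            simp [List.filter_append, Ne.symm hp]
          rw [this]
          cases hgl : (janela.filter (fun x => x.2 == p)).getLast? with
          | none => simp
          | some x => simp
      have hknd2 : ((PySem.Dict.mk ((last.insert e.2 e.1).items.filter
          (fun q => decide (e.1 - q.2 ≤ 60)))).keys).Nodup := by
        simp only [PySem.Dict.keys]
        exact hknd1.sublist (List.Sublist.map _ List.filter_sublist)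
      have hinv2 : ScanInv ((janela ++ [e]).filter (fun x => decide (e.1 - x.1 ≤ 60)))
          (pyAScanPop e.1 (janela ++ [e]) (PySem.Set.add portas e.2)).2
          (PySem.Dict.mk ((last.insert e.2 e.1).items.filter (fun q => decide (e.1 - q.2 ≤ 60)))) :=
        ⟨hnd2, hmem2, hknd2, hget2⟩
      have hlen := hinv2.size_eq
      simp only [pyAScan, pyBDetect]
      rw [← hw] at hinv2
      rw [hlen]
      split_ifs with h10
      · rfl
      · refine ih _ _ _ (by rw [hw]; exact hs'.sublist List.filter_sublist) hes.2 ?_ hinv2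
        intro x hx e' he'
        rw [hw] at hx
        have hx' := List.mem_of_mem_filter hx
        rcases List.mem_append.mp hx' with h | h
        · exact le_trans (hje x h e (by simp)) (hes.1 e' he')
        · simp only [List.mem_singleton] at h
          exact h ▸ hes.1 e' he'

-- The value-map applied to the grouping dict to obtain the counting dict.
def lenF : String × List (Int × Int) → String × Int := fun kv => (kv.1, (kv.2.length : Int))

-- One step of the two grouping folds keeps "counting dict = grouping dict mapped through lenF".
theorem modify_len_step (d1 : PySem.Dict String Int) (d2 : PySem.Dict String (List (Int × Int)))
    (hnd : d2.keys.Nodup) (h : d1.items = d2.items.map lenF) (k : String) (x : Int × Int) :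
    (d1.modify k 0 (· + 1)).items = (d2.modify k [] (· ++ [x])).items.map lenF := by
  have hfind : d1.items.find? (fun p => p.1 == k) =
      (d2.items.find? (fun p => p.1 == k)).map lenF := by
    rw [h, List.find?_map]
    rfl
  have hget : d1.getD k 0 = ((d2.getD k []).length : Int) := by
    simp only [PySem.Dict.getD, PySem.Dict.get?, hfind]
    cases d2.items.find? (fun p => p.1 == k) with
    | none => rfl
    | some q => rfl
  have hcont : d1.contains k = d2.contains k := by
    simp only [PySem.Dict.contains, h, List.any_map]
    rfl
  by_cases hk : d2.contains k = true
  · simp only [PySem.Dict.modify, PySem.Dict.insert, hcont, hk, if_true]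
    rw [h, List.map_map, List.map_map]
    apply List.map_congr_left
    intro q hq
    by_cases hq1 : q.1 = k
    · have hq2 : d2.getD k [] = q.2 := by
        refine PySem.Dict.getD_of_mem_items d2 ?_ hnd []
        rw [← hq1]
        exact hq
      simp only [Function.comp_apply, lenF, hq1, beq_self_eq_true]
      rw [hget, hq2]
      simp
    · simp [Function.comp_apply, lenF, hq1]
  · have hk1 : d1.contains k = false := by rw [hcont]; simpa using hk
    simp only [PySem.Dict.modify, PySem.Dict.insert, hcont,
      Bool.false_eq_true, if_false, hk]
    rw [List.map_append, ← h]
    simp [lenF, PySem.Dict.getD_of_not_contains d1 0 hk1,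
      PySem.Dict.getD_of_not_contains d2 [] (by simpa using hk)]

theorem counts_items (td : List (Int × String × Int)) :
    ∀ (d1 : PySem.Dict String Int) (d2 : PySem.Dict String (List (Int × Int))),
    d2.keys.Nodup → d1.items = d2.items.map lenF →
    (td.foldl (fun d e => d.modify e.2.1 0 (· + 1)) d1).items =
      (td.foldl (fun d e => d.modify e.2.1 [] (· ++ [(e.1, e.2.2)])) d2).items.map lenF := by
  induction td with
  | nil => intro d1 d2 _ h; exact h
  | cons e td ih =>
      intro d1 d2 hnd h
      simp only [List.foldl_cons]
      apply ih
      · have := PySem.Dict.nodup_keys_foldl_modify_key [e] (fun e => e.2.1) []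
          (fun _ x v => v ++ [(x.1, x.2.2)]) d2 hnd
        simpa using this
      · exact modify_len_step d1 d2 hnd h e.2.1 (e.1, e.2.2)

theorem scanInv_init : ScanInv [] PySem.Set.empty PySem.Dict.empty := by
  refine ⟨List.nodup_nil, ?_, ?_, ?_⟩ <;>
    simp [PySem.Set.empty, PySem.Dict.get?_empty, PySem.Dict.keys_empty]

-- ===== VERDICT (by name: the statement is the Claim_ definition above) =====
theorem analyze_traffic_spec : Claim_equal_analyze_traffic := by
  intro td _
  unfold Spec_analyze_traffic
  simp only [analyze_traffic, analyze_traffic_alt]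
  have hsplit := PySem.List.foldl_prod_mk
    (fun (d : PySem.Dict String Int) (e : Int × String × Int) => d.modify e.2.1 0 (· + 1))
    (fun (d : PySem.Dict String (List (Int × Int))) (e : Int × String × Int) =>
      d.modify e.2.1 [] (· ++ [(e.1, e.2.2)]))
    td PySem.Dict.empty PySem.Dict.empty
  rw [hsplit]
  dsimp only
  have hndG : ((td.foldl (fun (d : PySem.Dict String (List (Int × Int))) e =>
      d.modify e.2.1 [] (· ++ [(e.1, e.2.2)])) PySem.Dict.empty).items.map
      (fun kv => kv.1)).Nodup :=
    PySem.Dict.nodup_keys_foldl_modify_key td (fun e => e.2.1) []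
      (fun _ x v => v ++ [(x.1, x.2.2)]) PySem.Dict.empty (by simp [PySem.Dict.keys_empty])
  have hcounts := counts_items td PySem.Dict.empty PySem.Dict.empty
    (by simp [PySem.Dict.keys_empty]) (by rfl)
  have hAflags := PySem.Dict.items_foldl_insert_fresh
    (td.foldl (fun d e => d.modify e.2.1 [] (· ++ [(e.1, e.2.2)])) PySem.Dict.empty).items
    (fun kv => kv.1)
    (fun kv => pyAScan (PySem.List.sorted kv.2 (fun x => x.1) false) [] PySem.Set.empty)
    PySem.Dict.empty (fun a _ => PySem.Dict.contains_empty a.1) hndG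
  have hBflags := PySem.Dict.items_foldl_insert_fresh
    (td.foldl (fun d e => d.modify e.2.1 [] (· ++ [(e.1, e.2.2)])) PySem.Dict.empty).items
    (fun kv => kv.1)
    (fun kv => pyBDetect (PySem.List.sorted kv.2 (fun x => x.1) false) PySem.Dict.empty)
    PySem.Dict.empty (fun a _ => PySem.Dict.contains_empty a.1) hndG
  have hBcounts := PySem.Dict.items_foldl_insert_fresh
    (td.foldl (fun d e => d.modify e.2.1 [] (· ++ [(e.1, e.2.2)])) PySem.Dict.empty).items
    (fun kv => kv.1) (fun kv => (kv.2.length : Int))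
    PySem.Dict.empty (fun a _ => PySem.Dict.contains_empty a.1) hndG
  refine Prod.ext ?_ ?_
  · rw [hcounts, hBcounts]
    rfl
  · rw [hAflags, hBflags]
    refine congrArg (PySem.Dict.empty.items ++ ·) ?_
    apply List.map_congr_left
    intro kv _
    dsimp only
    rw [scan_equiv _ [] PySem.Set.empty PySem.Dict.empty List.Pairwise.nil
      (PySem.List.sorted_pairwise _ _) (by simp) scanInv_init]
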